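-- pv_equiv track=rewrite | github.com/TOP-Python224/_scripts | # 08.29_1.py | choose_nominal
-- ===== SOURCE A (Python) =====
-- from math import log10, ceil
-- from typing import Iterable, Callable
-- from numbers import Real
--
-- nominals = {
--     "E6": (10, 15, 22, 33, 47, 68),
--     "E12": (10, 12, 15, 18, 22, 27, 33, 39, 47, 56, 68, 82),
--     "E24": (10, 11, 12, 13, 15, 16, 18, 20, 22, 24, 27, 30, 33, 36, 39, 43, 47, 51, 56, 62, 68, 75, 82, 91),
--     "E48": (100, 105, 110, 115, 121, 127, 133, 140, 147, 154, 162, 169, 178, 187, 196, 205, 215, 226, 237, 249, 261, 274, 287, 301, 316, 332, 348, 365, 383, 402, 422, 442, 464, 487, 511, 536, 562, 590, 619, 649, 681, 715, 750, 787, 825, 866, 909, 953),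
--     "E96": (100, 102, 105, 107, 110, 113, 115, 118, 121, 124, 127, 130, 133, 137, 140, 143, 147, 150, 154, 158, 162, 165, 169, 174, 178, 182, 187, 191, 196, 200, 205, 210, 215, 221, 226, 232, 237, 243, 249, 255, 261, 267, 274, 280, 287, 294, 301, 309, 316, 324, 332, 340, 348, 357, 365, 374, 383, 392, 402, 412, 422, 432, 442, 453, 464, 475, 487, 499, 511, 523, 536, 549, 562, 576, 590, 604, 619, 634, 649, 665, 681, 698, 715, 732, 750, 768, 787, 806, 825, 845, 866, 887, 909, 931, 953, 976)
-- }
--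
-- def exp_base10(number: Real, exp: int = 1) -> Real:
--     """Возвращает число, умноженное на 10 в степени exp."""
--     return number * 10**exp
--
-- def abs_sub(number1: Real, number2: Real) -> Real:
--     return abs(number1 - number2)
--
-- def map_two_arg(func_object: Callable, iterator: Iterable, arg2=None) -> tuple:
--     """Возвращает кортеж с возвращаемыми значениями функции func_object(), вызванной с одним или двумя аргументами: элементом последовательности и значением параметра функции func_object() по умолчанию, либо arg2."""
--     res = ()
--     for elem in iterator:
--         if arg2 is None:
--             res += (func_object(elem), )
--         else:
--             res += (func_object(elem, arg2), )
--     return res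
--
-- def choose_nominal(required_nominal: Real) -> dict[str, int]:
--     """Возвращает ближайший к переданному номинал сопротивления из каждого ряда сопротивлений."""
--     res = dict.fromkeys(nominals)
--     for key, row in nominals.items():
--         if not (min(row) <= required_nominal <= max(row)):
--             # на сколько порядков отличается переданный номинал от базовых номиналов ряда
--             exp = ceil(log10(required_nominal // max(row)))
--             # приведение базовых номиналов ряда к одному порядку с переданным номиналом
--             row = map_two_arg(exp_base10, row, exp)
--         # вычисление модулей разности каждого числа ряда с переданным номиналом
--         row_delta = map_two_arg(abs_sub, row, required_nominal)
--         # поиск индекса минимальной разности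
--         i = row_delta.index(min(row_delta))
--         res[key] = row[i]
--     return res
-- ===== SOURCE B (Python) =====
-- from bisect import bisect_left
--
-- nominals = {
--     "E6": (10, 15, 22, 33, 47, 68),
--     "E12": (10, 12, 15, 18, 22, 27, 33, 39, 47, 56, 68, 82),
--     "E24": (10, 11, 12, 13, 15, 16, 18, 20, 22, 24, 27, 30, 33, 36, 39, 43, 47, 51, 56, 62, 68, 75, 82, 91),
--     "E48": (100, 105, 110, 115, 121, 127, 133, 140, 147, 154, 162, 169, 178, 187, 196, 205, 215, 226, 237, 249, 261, 274, 287, 301, 316, 332, 348, 365, 383, 402, 422, 442, 464, 487, 511, 536, 562, 590, 619, 649, 681, 715, 750, 787, 825, 866, 909, 953),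
--     "E96": (100, 102, 105, 107, 110, 113, 115, 118, 121, 124, 127, 130, 133, 137, 140, 143, 147, 150, 154, 158, 162, 165, 169, 174, 178, 182, 187, 191, 196, 200, 205, 210, 215, 221, 226, 232, 237, 243, 249, 255, 261, 267, 274, 280, 287, 294, 301, 309, 316, 324, 332, 340, 348, 357, 365, 374, 383, 392, 402, 412, 422, 432, 442, 453, 464, 475, 487, 499, 511, 523, 536, 549, 562, 576, 590, 604, 619, 634, 649, 665, 681, 698, 715, 732, 750, 768, 787, 806, 825, 845, 866, 887, 909, 931, 953, 976)
-- }
--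
-- def choose_nominal(required_nominal):
--     res = {}
--     for key, row in nominals.items():
--         lo, hi = row[0], row[-1]
--         if not (lo <= required_nominal <= hi):
--             # smallest exp >= 0 with 10**exp >= required_nominal // hi
--             q = required_nominal // hi
--             exp, p = 0, 1
--             while p < q:
--                 p *= 10
--                 exp += 1
--             row = tuple(v * 10 ** exp for v in row)
--         i = bisect_left(row, required_nominal)
--         if i == 0:
--             best = row[0]
--         elif i == len(row):
--             best = row[-1]
--         elif required_nominal - row[i - 1] <= row[i] - required_nominal:
--             best = row[i - 1]
--         else:
--             best = row[i]
--         res[key] = best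
--     return res
-- ===== Notes on version B (the rewrite author's own statement) =====
-- stated objective: alternative
-- what changed: A builds a tuple of all |row[i]-target| deltas by repeated tuple concatenation and then scans it twice (min, then .index); B binary-searches the sorted row with bisect_left and compares only the two neighbouring candidates, keeping the same out-of-range decimal-scaling branch.
-- outside the precondition, e.g. on choose_nominal(0): A raises ValueError, B returns {'E6': 10, 'E12': 10, 'E24': 10, 'E48': 100, 'E96': 100}; on choose_nominal(99): A raises ValueError, B returns {'E6': 68, 'E12': 82, 'E24': 91, 'E48': 100, 'E96': 100}
import Mathlib
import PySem

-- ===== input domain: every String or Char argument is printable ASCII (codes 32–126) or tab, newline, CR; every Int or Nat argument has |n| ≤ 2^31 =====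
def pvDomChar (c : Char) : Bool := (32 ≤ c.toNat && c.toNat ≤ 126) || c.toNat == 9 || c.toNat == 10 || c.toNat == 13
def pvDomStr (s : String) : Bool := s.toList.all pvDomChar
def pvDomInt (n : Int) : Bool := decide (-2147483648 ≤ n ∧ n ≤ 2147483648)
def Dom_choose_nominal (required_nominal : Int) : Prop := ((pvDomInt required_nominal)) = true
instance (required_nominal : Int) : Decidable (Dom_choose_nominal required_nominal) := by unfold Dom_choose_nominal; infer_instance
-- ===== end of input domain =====

-- B replaces A's tuple-of-deltas + .index(min) nearest scan by a
-- bisect_left binary search comparing the two neighbouring candidates; out-of-range scaling kept.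

-- the module constant `nominals` (shared data of both programs)
def nominalsE6 : List Int := [10, 15, 22, 33, 47, 68]
def nominalsE12 : List Int := [10, 12, 15, 18, 22, 27, 33, 39, 47, 56, 68, 82]
def nominalsE24 : List Int := [10, 11, 12, 13, 15, 16, 18, 20, 22, 24, 27, 30, 33, 36, 39, 43, 47, 51, 56, 62, 68, 75, 82, 91]
def nominalsE48 : List Int := [100, 105, 110, 115, 121, 127, 133, 140, 147, 154, 162, 169, 178, 187, 196, 205, 215, 226, 237, 249, 261, 274, 287, 301, 316, 332, 348, 365, 383, 402, 422, 442, 464, 487, 511, 536, 562, 590, 619, 649, 681, 715, 750, 787, 825, 866, 909, 953]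
def nominalsE96 : List Int := [100, 102, 105, 107, 110, 113, 115, 118, 121, 124, 127, 130, 133, 137, 140, 143, 147, 150, 154, 158, 162, 165, 169, 174, 178, 182, 187, 191, 196, 200, 205, 210, 215, 221, 226, 232, 237, 243, 249, 255, 261, 267, 274, 280, 287, 294, 301, 309, 316, 324, 332, 340, 348, 357, 365, 374, 383, 392, 402, 412, 422, 432, 442, 453, 464, 475, 487, 499, 511, 523, 536, 549, 562, 576, 590, 604, 619, 634, 649, 665, 681, 698, 715, 732, 750, 768, 787, 806, 825, 845, 866, 887, 909, 931, 953, 976]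

-- ===== PORT A =====
-- ceil(log10(q)) ported by hand as the least k ≥ 0 with 10^k ≥ q: exact for the integer
-- q = required_nominal // max(row) ≥ 1 reachable under Pre_ (CPython's log10 is exact on powers
-- of ten in this range, so ceil(log10 q) is that least k); fuel 64 is ample for |q| ≤ 2^31.
-- For q ≤ 0 Python raises ValueError — those inputs are outside Pre_choose_nominal.
def aCeilExpGo : Nat → Int → Nat → Int → Nat
  | 0, _, k, _ => k
  | f + 1, q, k, p => if q ≤ p then k else aCeilExpGo f q (k + 1) (p * 10)

def aCeilExp (q : Int) : Nat := aCeilExpGo 64 q 0 1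

-- map_two_arg(exp_base10, row, exp): the tuple-accumulating loop
def aScaleRow (row : List Int) (exp : Nat) : List Int :=
  row.foldl (fun acc e => acc ++ [e * 10 ^ exp]) []

-- map_two_arg(abs_sub, row, x): the tuple-accumulating loop
def aMapAbs (row : List Int) (x : Int) : List Int :=
  row.foldl (fun acc e => acc ++ [|e - x|]) []

-- one iteration of A's `for key, row in nominals.items()` body; the .getD 0 defaults are
-- unreachable (the row is a nonempty literal, min is a member of the deltas, the index is in range)
def aPickRow (x : Int) (row : List Int) : Int :=
  let mn := (PySem.List.min? row (fun v => v)).getD 0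
  let mx := (PySem.List.max? row (fun v => v)).getD 0
  let row2 := if ¬ (mn ≤ x ∧ x ≤ mx) then aScaleRow row (aCeilExp (PySem.Int.floordiv x mx)) else row
  let delta := aMapAbs row2 x
  let m := (PySem.List.min? delta (fun v => v)).getD 0
  let i := (PySem.List.index? delta m).getD 0
  (PySem.List.pyGet? row2 (i : Int)).getD 0

def choose_nominal (required_nominal : Int) : List (String × Int) :=
  [("E6", aPickRow required_nominal nominalsE6),
   ("E12", aPickRow required_nominal nominalsE12),
   ("E24", aPickRow required_nominal nominalsE24),
   ("E48", aPickRow required_nominal nominalsE48),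
   ("E96", aPickRow required_nominal nominalsE96)]

-- ===== PORT B =====
-- the `while p < q:` loop of Source B
def bExpGo : Nat → Int → Nat → Int → Nat
  | 0, _, e, _ => e
  | f + 1, q, e, p => if p < q then bExpGo f q (e + 1) (p * 10) else e

def bExp (q : Int) : Nat := bExpGo 64 q 0 1

-- one iteration of B's loop body: bisect_left, then compare the two neighbouring candidates
def bPickRow (x : Int) (row : List Int) : Int :=
  let lo := (PySem.List.pyGet? row 0).getD 0
  let hi := (PySem.List.pyGet? row (-1)).getD 0
  let row2 := if ¬ (lo ≤ x ∧ x ≤ hi) then row.map (fun v => v * 10 ^ bExp (PySem.Int.floordiv x hi)) else row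
  if PySem.List.bisectLeft row2 x = 0 then (PySem.List.pyGet? row2 0).getD 0
  else if PySem.List.bisectLeft row2 x = row2.length then (PySem.List.pyGet? row2 (-1)).getD 0
  else if x - (PySem.List.pyGet? row2 ((PySem.List.bisectLeft row2 x : Int) - 1)).getD 0 ≤
          (PySem.List.pyGet? row2 (PySem.List.bisectLeft row2 x : Int)).getD 0 - x then
    (PySem.List.pyGet? row2 ((PySem.List.bisectLeft row2 x : Int) - 1)).getD 0
  else (PySem.List.pyGet? row2 (PySem.List.bisectLeft row2 x : Int)).getD 0

def choose_nominal_alt (required_nominal : Int) : List (String × Int) :=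
  [("E6", bPickRow required_nominal nominalsE6),
   ("E12", bPickRow required_nominal nominalsE12),
   ("E24", bPickRow required_nominal nominalsE24),
   ("E48", bPickRow required_nominal nominalsE48),
   ("E96", bPickRow required_nominal nominalsE96)]

-- ===== PRECONDITION & SPEC =====
-- A raises ValueError (log10 of a non-positive number) exactly when required_nominal < 100
-- (then required_nominal // max(row) ≤ 0 for the E48 row, or earlier); Pre_ excludes exactly those.
def Pre_choose_nominal (required_nominal : Int) : Prop := 100 ≤ required_nominal
instance (required_nominal : Int) : Decidable (Pre_choose_nominal required_nominal) := by unfold Pre_choose_nominal; infer_instance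

def pvWitness_choose_nominal : Int := 150

def Spec_choose_nominal (required_nominal : Int) (out : List (String × Int)) : Prop := out = choose_nominal_alt required_nominal
instance (required_nominal : Int) (out : List (String × Int)) : Decidable (Spec_choose_nominal required_nominal out) := by unfold Spec_choose_nominal; infer_instance

-- ===== CLAIM (what is proved, stated in full; the proofs are below) =====
def Claim_equal_choose_nominal : Prop := ∀ (required_nominal : Int), Dom_choose_nominal required_nominal → Pre_choose_nominal required_nominal → Spec_choose_nominal required_nominal (choose_nominal required_nominal)

-- ===== LEMMAS AND PROOFS =====

lemma habs (a b : Int) : |a - b| = if a ≤ b then b - a else a - b := by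
  split_ifs with h
  · rw [abs_of_nonpos (by omega)]; ring
  · rw [abs_of_nonneg (by omega)]

lemma expGo_eq : ∀ (f : Nat) (q : Int) (k : Nat) (p : Int), aCeilExpGo f q k p = bExpGo f q k p := by
  intro f
  induction f with
  | zero => intro q k p; rfl
  | succ n ih =>
    intro q k p
    simp only [aCeilExpGo, bExpGo]
    by_cases h : q ≤ p
    · rw [if_pos h, if_neg (by omega)]
    · rw [if_neg h, if_pos (by omega)]; exact ih q (k + 1) (p * 10)

lemma exp_eq (q : Int) : aCeilExp q = bExp q := expGo_eq 64 q 0 1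

lemma le_getLast_of_sorted : ∀ (row : List Int) (hne : row ≠ []) (_ : row.Pairwise (· < ·))
    (y : Int), y ∈ row → y ≤ row.getLast hne := by
  intro row
  induction row with
  | nil => intro hne; exact absurd rfl hne
  | cons a t ih =>
    intro _ hs y hy
    cases t with
    | nil => simp at hy; simp [hy, List.getLast]
    | cons b u =>
      rw [List.getLast_cons (by simp)]
      rcases List.mem_cons.mp hy with rfl | hyt
      · exact le_of_lt ((List.pairwise_cons.mp hs).1 _ (List.getLast_mem _))
      · exact ih (by simp) (List.pairwise_cons.mp hs).2 y hyt

lemma min_sorted (row : List Int) (hne : row ≠ []) (hs : row.Pairwise (· < ·)) :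
    PySem.List.min? row (fun v => v) = some (row.head hne) := by
  cases hm : PySem.List.min? row (fun v => v) with
  | none => exact absurd ((PySem.List.min?_eq_none_iff _ _).mp hm) hne
  | some m =>
    have hmem := PySem.List.min?_mem hm
    have hmin := PySem.List.min?_isMin hm
    cases row with
    | nil => exact absurd rfl hne
    | cons a t =>
      simp only [List.head_cons]
      have h1 : m ≤ a := hmin a (by simp)
      rcases List.mem_cons.mp hmem with rfl | hmt
      · rfl
      · exact absurd ((List.pairwise_cons.mp hs).1 m hmt) (by omega)

lemma max_sorted (row : List Int) (hne : row ≠ []) (hs : row.Pairwise (· < ·)) :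
    PySem.List.max? row (fun v => v) = some (row.getLast hne) := by
  cases hm : PySem.List.max? row (fun v => v) with
  | none => exact absurd ((PySem.List.max?_eq_none_iff _ _).mp hm) hne
  | some m =>
    have hmem := PySem.List.max?_mem hm
    have hmax := PySem.List.max?_isMax hm
    have h1 : row.getLast hne ≤ m := hmax _ (List.getLast_mem hne)
    have h2 : m ≤ row.getLast hne := le_getLast_of_sorted row hne hs m hmem
    simp [le_antisymm h2 h1]

lemma sel_unique {R : List Int} {x : Int} {i k : Nat} (hi : i < R.length) (hk : k < R.length)
    (hi1 : ∀ j (hj : j < R.length), |R[i] - x| ≤ |R[j] - x|)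
    (hi2 : ∀ j (hj : j < R.length), j < i → |R[i] - x| < |R[j] - x|)
    (hk1 : ∀ j (hj : j < R.length), |R[k] - x| ≤ |R[j] - x|)
    (hk2 : ∀ j (hj : j < R.length), j < k → |R[k] - x| < |R[j] - x|) : i = k := by
  rcases lt_trichotomy i k with h | h | h
  · have h3 := hk2 i hi h
    have h4 := hi1 k hk
    omega
  · exact h
  · have h3 := hi2 k hk h
    have h4 := hk1 i hi
    omega

-- the core: A's first-index-of-minimal-delta scan equals B's bisect + neighbour comparison
-- on any nonempty strictly increasing list
lemma aMapAbs_eq (R : List Int) (x : Int) : aMapAbs R x = R.map (fun e => |e - x|) := by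
  unfold aMapAbs
  rw [PySem.List.foldl_append_singleton_eq_map (fun e => |e - x|), List.nil_append]

lemma aScaleRow_eq (row : List Int) (exp : Nat) :
    aScaleRow row exp = row.map (fun v => v * 10 ^ exp) := by
  unfold aScaleRow
  rw [PySem.List.foldl_append_singleton_eq_map (fun v => v * 10 ^ exp), List.nil_append]

lemma sel_eq (x : Int) (R : List Int) (hne : R ≠ []) (hs : R.Pairwise (· < ·)) :
    (PySem.List.pyGet? R
      (((PySem.List.index? (aMapAbs R x)
          ((PySem.List.min? (aMapAbs R x) (fun v => v)).getD 0)).getD 0 : Nat) : Int)).getD 0 =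
    (if PySem.List.bisectLeft R x = 0 then (PySem.List.pyGet? R 0).getD 0
     else if PySem.List.bisectLeft R x = R.length then (PySem.List.pyGet? R (-1)).getD 0
     else if x - (PySem.List.pyGet? R ((PySem.List.bisectLeft R x : Int) - 1)).getD 0 ≤
             (PySem.List.pyGet? R (PySem.List.bisectLeft R x : Int)).getD 0 - x then
       (PySem.List.pyGet? R ((PySem.List.bisectLeft R x : Int) - 1)).getD 0
     else (PySem.List.pyGet? R (PySem.List.bisectLeft R x : Int)).getD 0) := by
  have hlen0 : 0 < R.length := by
    cases R with
    | nil => exact absurd rfl hne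
    | cons a t => simp
  have hsg : ∀ (i j : Nat) (_ : i < R.length) (_ : j < R.length), i < j → R[i] < R[j] :=
    List.pairwise_iff_getElem.mp hs
  obtain ⟨hble, hblt, hbge⟩ := PySem.List.bisectLeft_spec R x (hs.imp fun h => le_of_lt h)
  set b := PySem.List.bisectLeft R x with hbdef
  rw [aMapAbs_eq]
  cases hm : PySem.List.min? (R.map fun e => |e - x|) (fun v => v) with
  | none =>
    exact absurd ((PySem.List.min?_eq_none_iff _ _).mp hm) (by simp [List.map_eq_nil_iff, hne])
  | some m =>
    have hmem := PySem.List.min?_mem hm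
    have hminv := PySem.List.min?_isMin hm
    simp only [Option.getD_some]
    cases hidx : PySem.List.index? (R.map fun e => |e - x|) m with
    | none => exact absurd hmem ((PySem.List.index?_eq_none_iff _ _).mp hidx)
    | some i =>
      obtain ⟨hiLen, hEq, hFirst⟩ := PySem.List.getElem_of_index?_eq_some hidx
      simp only [Option.getD_some]
      have hiR : i < R.length := by simpa using hiLen
      have hmEq : m = |R[i] - x| := by rw [← hEq]; simp
      have hIA1 : ∀ j (_ : j < R.length), |R[i] - x| ≤ |R[j] - x| := by
        intro j hj
        rw [← hmEq]
        exact hminv _ (List.mem_map.mpr ⟨R[j], List.getElem_mem hj, rfl⟩)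
      have hIA2 : ∀ j (_ : j < R.length), j < i → |R[i] - x| < |R[j] - x| := by
        intro j hj hji
        have h2 : |R[j] - x| ≠ m := by simpa using hFirst j hji
        have h3 : m ≤ |R[j] - x| :=
          hminv _ (List.mem_map.mpr ⟨R[j], List.getElem_mem hj, rfl⟩)
        omega
      have hAv : (PySem.List.pyGet? R (i : Int)).getD 0 = R[i] := by
        rw [PySem.List.pyGet?_natCast, List.getElem?_eq_getElem hiR, Option.getD_some]
      rw [hAv]
      by_cases hb0 : b = 0
      · rw [if_pos hb0]
        have hBv : (PySem.List.pyGet? R 0).getD 0 = R[0] := by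
          rw [PySem.List.pyGet?_zero, List.getElem?_eq_getElem hlen0, Option.getD_some]
        rw [hBv]
        have hk1 : ∀ j (_ : j < R.length), |R[0] - x| ≤ |R[j] - x| := by
          intro j hj
          have hx0 : x ≤ R[0] := hbge 0 hlen0 (by omega)
          have hxj : x ≤ R[j] := hbge j hj (by omega)
          have h0j : R[0] ≤ R[j] := by
            rcases Nat.eq_zero_or_pos j with rfl | h
            · exact le_refl _
            · exact le_of_lt (hsg 0 j hlen0 hj h)
          rw [habs, habs]; split_ifs <;> omega
        have hk2 : ∀ j (_ : j < R.length), j < 0 → |R[0] - x| < |R[j] - x| := by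
          intro j hj h; omega
        have hik := sel_unique hiR hlen0 hIA1 hIA2 hk1 hk2
        simp only [hik]
      · by_cases hbn : b = R.length
        · rw [if_neg hb0, if_pos hbn]
          have hBv : (PySem.List.pyGet? R (-1)).getD 0 = R[R.length - 1] := by
            rw [PySem.List.pyGet?_neg_one, List.getLast?_eq_some_getLast hne, Option.getD_some,
                List.getLast_eq_getElem]
          rw [hBv]
          have hk1 : ∀ j (_ : j < R.length), |R[R.length - 1] - x| ≤ |R[j] - x| := by
            intro j hj
            have hjx : R[j] < x := hblt j hj (by omega)
            have hlx : R[R.length - 1] < x := hblt _ (by omega) (by omega)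
            have hjl : R[j] ≤ R[R.length - 1] := by
              by_cases hj1 : j = R.length - 1
              · simp only [hj1]; exact le_refl _
              · exact le_of_lt (hsg j (R.length - 1) hj (by omega) (by omega))
            rw [habs, habs]; split_ifs <;> omega
          have hk2 : ∀ j (_ : j < R.length), j < R.length - 1 → |R[R.length - 1] - x| < |R[j] - x| := by
            intro j hj hjk
            have hjx : R[j] < x := hblt j hj (by omega)
            have hlx : R[R.length - 1] < x := hblt _ (by omega) (by omega)
            have hjl : R[j] < R[R.length - 1] := hsg j (R.length - 1) hj (by omega) hjk
            rw [habs, habs]; split_ifs <;> omega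
          have hik := sel_unique hiR (by omega) hIA1 hIA2 hk1 hk2
          simp only [hik]
        · have hbr : 0 < b ∧ b < R.length := by omega
          have ha : R[b - 1] < x := hblt (b - 1) (by omega) (by omega)
          have hc : x ≤ R[b]'(by omega) := hbge b (by omega) (by omega)
          have hcast : ((b : Int) - 1) = ((b - 1 : Nat) : Int) := by omega
          have hgetb1 : (PySem.List.pyGet? R ((b : Int) - 1)).getD 0 = R[b - 1] := by
            rw [hcast, PySem.List.pyGet?_natCast, List.getElem?_eq_getElem (by omega : b - 1 < R.length),
                Option.getD_some]
          have hgetb : (PySem.List.pyGet? R (b : Int)).getD 0 = R[b]'(by omega) := by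
            rw [PySem.List.pyGet?_natCast, List.getElem?_eq_getElem (by omega : b < R.length),
                Option.getD_some]
          rw [if_neg hb0, if_neg hbn, hgetb1, hgetb]
          by_cases hcond : x - R[b - 1] ≤ R[b]'(by omega) - x
          · rw [if_pos hcond]
            have hk1 : ∀ j (_ : j < R.length), |R[b - 1] - x| ≤ |R[j] - x| := by
              intro j hj
              by_cases h : j ≤ b - 1
              · have hjx : R[j] < x := hblt j hj (by omega)
                have hjb : R[j] ≤ R[b - 1] := by
                  by_cases hj1 : j = b - 1
                  · simp only [hj1]; exact le_refl _
                  · exact le_of_lt (hsg j (b - 1) hj (by omega) (by omega))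
                rw [habs, habs]; split_ifs <;> omega
              · have hxj : x ≤ R[j] := hbge j hj (by omega)
                have hbj : R[b]'(by omega) ≤ R[j] := by
                  by_cases hj1 : j = b
                  · simp only [hj1]; exact le_refl _
                  · exact le_of_lt (hsg b j (by omega) hj (by omega))
                rw [habs, habs]; split_ifs <;> omega
            have hk2 : ∀ j (_ : j < R.length), j < b - 1 → |R[b - 1] - x| < |R[j] - x| := by
              intro j hj hjk
              have hjx : R[j] < x := hblt j hj (by omega)
              have hjb : R[j] < R[b - 1] := hsg j (b - 1) hj (by omega) hjk
              rw [habs, habs]; split_ifs <;> omega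
            have hik := sel_unique hiR (by omega) hIA1 hIA2 hk1 hk2
            simp only [hik]
          · rw [if_neg hcond]
            have hcond' : R[b]'(by omega) - x < x - R[b - 1] := by omega
            have hk1 : ∀ j (_ : j < R.length), |R[b]'(by omega) - x| ≤ |R[j] - x| := by
              intro j hj
              by_cases h : j < b
              · have hjx : R[j] < x := hblt j hj (by omega)
                have hjb : R[j] ≤ R[b - 1] := by
                  by_cases hj1 : j = b - 1
                  · simp only [hj1]; exact le_refl _
                  · exact le_of_lt (hsg j (b - 1) hj (by omega) (by omega))
                rw [habs, habs]; split_ifs <;> omega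
              · have hxj : x ≤ R[j] := hbge j hj (by omega)
                have hbj : R[b]'(by omega) ≤ R[j] := by
                  by_cases hj1 : j = b
                  · simp only [hj1]; exact le_refl _
                  · exact le_of_lt (hsg b j (by omega) hj (by omega))
                rw [habs, habs]; split_ifs <;> omega
            have hk2 : ∀ j (_ : j < R.length), j < b → |R[b]'(by omega) - x| < |R[j] - x| := by
              intro j hj hjk
              have hjx : R[j] < x := hblt j hj hjk
              have hjb : R[j] ≤ R[b - 1] := by
                by_cases hj1 : j = b - 1
                · simp only [hj1]; exact le_refl _
                · exact le_of_lt (hsg j (b - 1) hj (by omega) (by omega))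
              rw [habs, habs]; split_ifs <;> omega
            have hik := sel_unique hiR (by omega) hIA1 hIA2 hk1 hk2
            simp only [hik]

lemma pick_eq (x : Int) (row : List Int) (hne : row ≠ []) (hs : row.Pairwise (· < ·)) :
    aPickRow x row = bPickRow x row := by
  have hlen0 : 0 < row.length := by
    cases row with
    | nil => exact absurd rfl hne
    | cons a t => simp
  have hmn : (PySem.List.min? row (fun v => v)).getD 0 = row.head hne := by
    rw [min_sorted row hne hs, Option.getD_some]
  have hmx : (PySem.List.max? row (fun v => v)).getD 0 = row.getLast hne := by
    rw [max_sorted row hne hs, Option.getD_some]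
  have hlo : (PySem.List.pyGet? row 0).getD 0 = row.head hne := by
    rw [PySem.List.pyGet?_zero, List.getElem?_eq_getElem hlen0, Option.getD_some,
        List.getElem_zero hlen0]
  have hhi : (PySem.List.pyGet? row (-1)).getD 0 = row.getLast hne := by
    rw [PySem.List.pyGet?_neg_one, List.getLast?_eq_some_getLast hne, Option.getD_some]
  unfold aPickRow bPickRow
  simp only [hmn, hmx, hlo, hhi, aScaleRow_eq, exp_eq]
  refine sel_eq x _ ?_ ?_
  · split_ifs with h
    · exact hne
    · simp [List.map_eq_nil_iff, hne]
  · split_ifs with h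
    · exact hs
    · refine List.pairwise_map.mpr (hs.imp ?_)
      intro u v huv
      have hp : (0 : Int) < 10 ^ bExp (PySem.Int.floordiv x (row.getLast hne)) := by positivity
      exact mul_lt_mul_of_pos_right huv hp

-- ===== VERDICT (by name: the statement is the Claim_ definition above) =====
theorem choose_nominal_spec : Claim_equal_choose_nominal := by
  intro x _ _
  unfold Spec_choose_nominal choose_nominal choose_nominal_alt
  rw [pick_eq x nominalsE6 (by decide) (by decide),
      pick_eq x nominalsE12 (by decide) (by decide),
      pick_eq x nominalsE24 (by decide) (by decide),
      pick_eq x nominalsE48 (by decide) (by decide),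
      pick_eq x nominalsE96 (by decide) (by decide)]
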